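-- pv_equiv track=rewrite | github.com/Arelle/Arelle | arelle/plugin/loadFromOIM.py | xlTrimHeaderRow
-- ===== SOURCE A (Python) =====
-- def xlTrimHeaderRow(row):
--     numEmptyCellsAtEndOfRow = 0
--     for i in range(len(row)-1, -1, -1):
--         if row[i] in (None, ""):
--             numEmptyCellsAtEndOfRow += 1
--         else:
--             break
--     if numEmptyCellsAtEndOfRow:
--         return row[:-numEmptyCellsAtEndOfRow]
--     return row
-- ===== SOURCE B (Python) =====
-- def xlTrimHeaderRow(row):
--     last = -1
--     for i, cell in enumerate(row):
--         if cell not in (None, ""):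
--             last = i
--     return row[:last+1]
-- ===== Notes on version B (the rewrite author's own statement) =====
-- stated objective: alternative
-- what changed: Replaces the backward count-and-break loop plus negative slice with a single forward pass recording the index of the last non-empty cell, then one non-negative slice row[:last+1].
import Mathlib
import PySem

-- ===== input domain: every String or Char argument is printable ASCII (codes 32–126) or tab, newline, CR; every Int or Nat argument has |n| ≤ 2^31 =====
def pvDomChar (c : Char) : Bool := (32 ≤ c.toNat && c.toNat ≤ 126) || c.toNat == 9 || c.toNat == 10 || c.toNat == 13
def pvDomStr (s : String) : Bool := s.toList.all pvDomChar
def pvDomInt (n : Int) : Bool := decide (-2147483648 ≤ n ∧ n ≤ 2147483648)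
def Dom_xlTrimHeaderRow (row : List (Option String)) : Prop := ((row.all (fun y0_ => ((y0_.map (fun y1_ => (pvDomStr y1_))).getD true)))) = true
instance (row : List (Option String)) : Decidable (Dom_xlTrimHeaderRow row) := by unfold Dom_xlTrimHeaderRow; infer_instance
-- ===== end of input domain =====

-- B replaces A's backward count-and-break loop and negative slice by one forward
-- pass recording the last non-empty index, then a non-negative slice (alternative decomposition).

-- ===== PORT A =====
-- cell in (None, "")
def pvIsEmptyCell (c : Option String) : Bool := c == none || c == some ""

-- A's loop 'for i in range(len(row)-1,-1,-1): … else break' counts the leading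
-- empty cells of the reversed row and stops at the first non-empty one.
def pvCountTrail : List (Option String) → Nat
  | [] => 0
  | x :: xs => if pvIsEmptyCell x then pvCountTrail xs + 1 else 0

def xlTrimHeaderRow (row : List (Option String)) : List (Option String) :=
  let numEmptyCellsAtEndOfRow := pvCountTrail row.reverse
  if numEmptyCellsAtEndOfRow ≠ 0 then
    PySem.List.slice row none (some (-(numEmptyCellsAtEndOfRow : Int)))   -- row[:-n]
  else row

-- ===== PORT B =====
-- B's forward loop: last index of a non-empty cell, -1 if none.
def pvLastNonEmpty (row : List (Option String)) : Int :=
  (PySem.List.enumerate row 0).foldl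
    (fun last p => if ¬ pvIsEmptyCell p.2 then p.1 else last) (-1)

def xlTrimHeaderRow_alt (row : List (Option String)) : List (Option String) :=
  PySem.List.slice row none (some (pvLastNonEmpty row + 1))   -- row[:last+1]

-- ===== PRECONDITION & SPEC =====
def Spec_xlTrimHeaderRow (row : List (Option String)) (out : List (Option String)) : Prop := out = xlTrimHeaderRow_alt row
instance (row : List (Option String)) (out : List (Option String)) : Decidable (Spec_xlTrimHeaderRow row out) := by unfold Spec_xlTrimHeaderRow; infer_instance

-- ===== CLAIM (what is proved, stated in full; the proofs are below) =====
def Claim_equal_xlTrimHeaderRow : Prop := ∀ (row : List (Option String)), Dom_xlTrimHeaderRow row → Spec_xlTrimHeaderRow row (xlTrimHeaderRow row)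

-- ===== LEMMAS AND PROOFS =====

theorem pvCountTrail_le (xs : List (Option String)) : pvCountTrail xs ≤ xs.length := by
  induction xs with
  | nil => simp [pvCountTrail]
  | cons x xs ih => simp only [pvCountTrail, List.length_cons]; split <;> omega

-- the forward fold with a given start index over enumerate
theorem foldl_last_append (xs : List (Int × Option String)) (p : Int × Option String) (init : Int) :
    (xs ++ [p]).foldl (fun last q => if ¬ pvIsEmptyCell q.2 then q.1 else last) init
    = (if ¬ pvIsEmptyCell p.2 then p.1
       else xs.foldl (fun last q => if ¬ pvIsEmptyCell q.2 then q.1 else last) init) := by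
  simp [List.foldl_append]

theorem pvLastNonEmpty_eq (row : List (Option String)) :
    pvLastNonEmpty row + 1 = (row.length : Int) - (pvCountTrail row.reverse : Int) := by
  induction row using List.reverseRecOn with
  | nil => simp [pvLastNonEmpty, pvCountTrail]
  | append_singleton xs x ih =>
    have h := pvCountTrail_le xs.reverse
    simp only [pvLastNonEmpty, PySem.List.enumerate_append, foldl_last_append] at *
    by_cases hx : pvIsEmptyCell x
    · simp [hx, pvCountTrail, List.reverse_append]
      simp [PySem.List.enumerate] at ih ⊢
      omega
    · simp [hx, pvCountTrail, List.reverse_append]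

theorem A_eq_take (row : List (Option String)) :
    xlTrimHeaderRow row = row.take (row.length - pvCountTrail row.reverse) := by
  unfold xlTrimHeaderRow
  by_cases h : pvCountTrail row.reverse = 0
  · simp [h]
  · have h0 : 0 < pvCountTrail row.reverse := Nat.pos_of_ne_zero h
    simp only [h, ne_eq, not_false_eq_true, if_pos]
    exact PySem.List.slice_to_neg_natCast row _ h0

theorem B_eq_take (row : List (Option String)) :
    xlTrimHeaderRow_alt row = row.take (row.length - pvCountTrail row.reverse) := by
  unfold xlTrimHeaderRow_alt
  have h := pvLastNonEmpty_eq row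
  have hle := pvCountTrail_le row.reverse
  rw [List.length_reverse] at hle
  have hnn : 0 ≤ pvLastNonEmpty row + 1 := by omega
  rw [PySem.List.slice_to row hnn]
  congr 1
  omega

-- ===== VERDICT (by name: the statement is the Claim_ definition above) =====
theorem xlTrimHeaderRow_spec : Claim_equal_xlTrimHeaderRow := by
  intro row _
  unfold Spec_xlTrimHeaderRow
  rw [A_eq_take, B_eq_take]
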